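-- pv_equiv track=rewrite | github.com/jjz17/Tennis-Match-Outcome-Prediction | src/functions.py | extract_game_data
-- ===== SOURCE A (Python) =====
-- def extract_game_data(game_pbp):
--     """
--     Extracts relevant data from a game's play-by-play information.
--
--     Parameters:
--         game_pbp (str): The string which encodes the play-by-play information.
--
--     Returns:
--         list: A list which contains the computed data.
--     """
--     s_points = 0
--     r_points = 0
--     s_momentum = 0
--     r_momentum = 0
--     breaks = 0
--     aces = 0
--
--     # iterate through each point
--     for i in range(len(game_pbp)):
--         point = game_pbp[i]
--
--         # Handle momentum quantification
--         serve_momentum, m_count = momentum_check(game_pbp[i:])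
--         if m_count > 0:
--             if serve_momentum:
--                 s_momentum += 1
--             else:
--                 r_momentum += 1
--
--         if point == 'S':
--             s_points += 1
--         elif point == 'A':
--             aces += 1
--             s_points += 1
--         elif point == 'R':
--             r_points += 1
--         elif point == 'D':
--             r_points += 1
--         else:
--             s_points += 0
--
--     if r_points > s_points:
--         breaks = 1
--
--     return [s_points, r_points, s_momentum, r_momentum, breaks, aces]
--
-- def momentum_check(pbp, tiebreak=False):
--     """
--     Calculates the momentum generated either by the server or returner.
--
--     Parameters:
--         pbp (str): The string which encodes the play-by-play information.
--         tiebreak (boolean): A boolean that signifies whether the given pbp is a tiebreak.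
--
--     Returns:
--         s_momentum (boolean): A boolean that signifies whether the momentum was generated by the server.
--         momentum (int): The quantity of momentum generated by the player.
--     """
--     momentum_threshold = 3
--     if tiebreak:
--         momentum_threshold = 2
--
--     s_momentum = True
--     momentum = 0
--     if len(pbp) >= momentum_threshold:
--         if set(pbp[:momentum_threshold]).issubset({'A', 'S'}):
--             momentum += 1
--         if set(pbp[:momentum_threshold]).issubset({'R', 'D'}):
--             momentum += 1
--             s_momentum = False
--     return s_momentum, momentum
-- ===== SOURCE B (Python) =====
-- def extract_game_data(game_pbp):
--     """Single-pass re-implementation: incremental run-length counters replace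
--     the per-position 3-char window scan."""
--     s_points = 0
--     r_points = 0
--     s_momentum = 0
--     r_momentum = 0
--     aces = 0
--     serve_run = 0
--     return_run = 0
--
--     for ch in game_pbp:
--         if ch == 'S':
--             s_points += 1
--         elif ch == 'A':
--             aces += 1
--             s_points += 1
--         elif ch == 'R' or ch == 'D':
--             r_points += 1
--
--         if ch == 'A' or ch == 'S':
--             serve_run += 1
--             return_run = 0
--             if serve_run >= 3:
--                 s_momentum += 1
--         elif ch == 'R' or ch == 'D':
--             return_run += 1
--             serve_run = 0
--             if return_run >= 3:
--                 r_momentum += 1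
--         else:
--             serve_run = 0
--             return_run = 0
--
--     breaks = 1 if r_points > s_points else 0
--     return [s_points, r_points, s_momentum, r_momentum, breaks, aces]
-- ===== Notes on version B (the rewrite author's own statement) =====
-- stated objective: faster
-- what changed: Replaced the per-position momentum_check on a fresh suffix slice (O(n) slicing per character) with a single pass maintaining incremental serve/return run-length counters that add momentum when a run reaches 3.
import Mathlib
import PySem

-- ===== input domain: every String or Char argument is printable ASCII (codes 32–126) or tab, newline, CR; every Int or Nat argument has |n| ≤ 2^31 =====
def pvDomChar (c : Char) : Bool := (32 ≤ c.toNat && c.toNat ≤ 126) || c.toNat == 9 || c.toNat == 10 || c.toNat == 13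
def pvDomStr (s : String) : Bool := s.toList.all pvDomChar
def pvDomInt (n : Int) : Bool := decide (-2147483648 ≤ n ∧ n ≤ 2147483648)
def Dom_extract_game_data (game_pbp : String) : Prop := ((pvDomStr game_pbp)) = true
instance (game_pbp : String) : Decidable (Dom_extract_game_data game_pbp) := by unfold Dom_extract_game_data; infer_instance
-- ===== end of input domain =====

-- B replaces A's per-position momentum_check on a fresh suffix slice with one pass
-- maintaining incremental serve/return run-length counters (objective: faster).

-- ===== PORT A =====
-- helper of A: momentum_check(pbp, tiebreak=False), ported over List Char
def momentum_check (pbp : List Char) (tiebreak : Bool) : Bool × Int :=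
  let momentum_threshold : Int := if tiebreak then 2 else 3
  let s_momentum : Bool := true
  let momentum : Int := 0
  if momentum_threshold ≤ (pbp.length : Int) then
    let pre := PySem.List.slice pbp none (some momentum_threshold)
    let momentum :=
      if PySem.Set.issubset (PySem.Set.ofList pre) (PySem.Set.ofList ['A', 'S']) then momentum + 1
      else momentum
    if PySem.Set.issubset (PySem.Set.ofList pre) (PySem.Set.ofList ['R', 'D']) then
      (false, momentum + 1)
    else
      (s_momentum, momentum)
  else
    (s_momentum, momentum)

-- the body of A's `for i in range(len(game_pbp))` loop
def aBody (cs : List Char) (st : Int × Int × Int × Int × Int) (i : Int) :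
    Int × Int × Int × Int × Int :=
  let (s_points, r_points, s_momentum, r_momentum, aces) := st
  let point := PySem.List.pyGetD cs i ' '   -- i ∈ range(len cs), so always in range
  let mc := momentum_check (PySem.List.slice cs (some i) none) false
  let serve_momentum := mc.1
  let m_count := mc.2
  let (s_momentum, r_momentum) :=
    if 0 < m_count then
      if serve_momentum then (s_momentum + 1, r_momentum) else (s_momentum, r_momentum + 1)
    else (s_momentum, r_momentum)
  if point = 'S' then (s_points + 1, r_points, s_momentum, r_momentum, aces)
  else if point = 'A' then (s_points + 1, r_points, s_momentum, r_momentum, aces + 1)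
  else if point = 'R' then (s_points, r_points + 1, s_momentum, r_momentum, aces)
  else if point = 'D' then (s_points, r_points + 1, s_momentum, r_momentum, aces)
  else (s_points + 0, r_points, s_momentum, r_momentum, aces)

def extract_game_data (game_pbp : String) : List Int :=
  let cs := game_pbp.toList
  let st :=
    (PySem.List.pyRange 0 (cs.length : Int) 1).foldl (aBody cs) (0, 0, 0, 0, 0)
  let (s_points, r_points, s_momentum, r_momentum, aces) := st
  let breaks : Int := if r_points > s_points then 1 else 0
  [s_points, r_points, s_momentum, r_momentum, breaks, aces]

-- ===== PORT B =====
-- the body of B's single `for ch in game_pbp` loop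
def bStep (st : Int × Int × Int × Int × Int × Int × Int) (ch : Char) :
    Int × Int × Int × Int × Int × Int × Int :=
  let (s_points, r_points, s_momentum, r_momentum, aces, serve_run, return_run) := st
  let (s_points, r_points, aces) :=
    if ch = 'S' then (s_points + 1, r_points, aces)
    else if ch = 'A' then (s_points + 1, r_points, aces + 1)
    else if ch = 'R' ∨ ch = 'D' then (s_points, r_points + 1, aces)
    else (s_points, r_points, aces)
  if ch = 'A' ∨ ch = 'S' then
    let serve_run := serve_run + 1
    (s_points, r_points, (if 3 ≤ serve_run then s_momentum + 1 else s_momentum),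
     r_momentum, aces, serve_run, 0)
  else if ch = 'R' ∨ ch = 'D' then
    let return_run := return_run + 1
    (s_points, r_points, s_momentum,
     (if 3 ≤ return_run then r_momentum + 1 else r_momentum), aces, 0, return_run)
  else
    (s_points, r_points, s_momentum, r_momentum, aces, 0, 0)

def extract_game_data_alt (game_pbp : String) : List Int :=
  let st := game_pbp.toList.foldl bStep (0, 0, 0, 0, 0, 0, 0)
  let (s_points, r_points, s_momentum, r_momentum, aces, _, _) := st
  let breaks : Int := if r_points > s_points then 1 else 0
  [s_points, r_points, s_momentum, r_momentum, breaks, aces]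

-- ===== PRECONDITION & SPEC =====
def Spec_extract_game_data (game_pbp : String) (out : List Int) : Prop := out = extract_game_data_alt game_pbp
instance (game_pbp : String) (out : List Int) : Decidable (Spec_extract_game_data game_pbp out) := by unfold Spec_extract_game_data; infer_instance

-- ===== CLAIM (what is proved, stated in full; the proofs are below) =====
def Claim_equal_extract_game_data : Prop := ∀ (game_pbp : String), Dom_extract_game_data game_pbp → Spec_extract_game_data game_pbp (extract_game_data game_pbp)

-- ===== LEMMAS AND PROOFS =====

-- A's loop, rephrased as a recursion over the suffixes of the input
def aStep (suf : List Char) (st : Int × Int × Int × Int × Int) :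
    Int × Int × Int × Int × Int :=
  let (s_points, r_points, s_momentum, r_momentum, aces) := st
  let point := suf.headD ' '
  let mc := momentum_check suf false
  let serve_momentum := mc.1
  let m_count := mc.2
  let (s_momentum, r_momentum) :=
    if 0 < m_count then
      if serve_momentum then (s_momentum + 1, r_momentum) else (s_momentum, r_momentum + 1)
    else (s_momentum, r_momentum)
  if point = 'S' then (s_points + 1, r_points, s_momentum, r_momentum, aces)
  else if point = 'A' then (s_points + 1, r_points, s_momentum, r_momentum, aces + 1)
  else if point = 'R' then (s_points, r_points + 1, s_momentum, r_momentum, aces)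
  else if point = 'D' then (s_points, r_points + 1, s_momentum, r_momentum, aces)
  else (s_points + 0, r_points, s_momentum, r_momentum, aces)

def aGo : List Char → (Int × Int × Int × Int × Int) → Int × Int × Int × Int × Int
  | [], st => st
  | c :: rest, st => aGo rest (aStep (c :: rest) st)

lemma foldA_eq_aGo (cs : List Char) : ∀ (n k : Nat) (st : Int × Int × Int × Int × Int),
    cs.length - k = n →
    (PySem.List.pyRange (k : Int) (cs.length : Int) 1).foldl (aBody cs) st = aGo (cs.drop k) st := by
  intro n
  induction n with
  | zero =>
    intro k st h
    have hk : cs.length ≤ k := by omega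
    have h1 : PySem.List.pyRange (k : Int) (cs.length : Int) 1 = [] := by
      rw [PySem.List.pyRange_one]
      have : ((cs.length : Int) - (k : Int)).toNat = 0 := by omega
      simp [this]
    rw [h1, List.drop_eq_nil_of_le hk]
    rfl
  | succ n ih =>
    intro k st h
    have hk : k < cs.length := by omega
    have hlt : (k : Int) < (cs.length : Int) := by exact_mod_cast hk
    rw [PySem.List.pyRange_one_cons hlt, List.foldl_cons]
    have hc : ((k : Int) + 1) = ((k + 1 : Nat) : Int) := by push_cast; ring
    rw [hc, ih (k + 1) _ (by omega)]
    have hdrop : cs.drop k = cs[k] :: cs.drop (k + 1) := List.drop_eq_getElem_cons hk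
    rw [hdrop]
    show aGo (cs.drop (k + 1)) (aBody cs st (k : Int)) =
      aGo (cs.drop (k + 1)) (aStep (cs[k] :: cs.drop (k + 1)) st)
    congr 1
    have hpt : PySem.List.pyGetD cs (k : Int) ' ' = (cs.drop k).headD ' ' := by
      rw [hdrop]
      simp [PySem.List.pyGetD_natCast, List.getD_eq_getElem?_getD, List.getElem?_eq_getElem hk]
    unfold aBody aStep
    rw [← hdrop, PySem.List.slice_from_natCast, hpt]

lemma mc_short1 (c : Char) : momentum_check [c] false = (true, 0) := by
  simp [momentum_check]

lemma mc_short2 (c d : Char) : momentum_check [c, d] false = (true, 0) := by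
  simp [momentum_check]

lemma issubset3 (c d e x y : Char) :
    PySem.Set.issubset (PySem.Set.ofList [c, d, e]) (PySem.Set.ofList [x, y]) =
      decide ((c = x ∨ c = y) ∧ (d = x ∨ d = y) ∧ (e = x ∨ e = y)) := by
  by_cases h : (c = x ∨ c = y) ∧ (d = x ∨ d = y) ∧ (e = x ∨ e = y)
  · rw [decide_eq_true h, PySem.Set.issubset_iff]
    intro z hz
    rw [PySem.Set.mem_ofList] at hz
    rw [PySem.Set.mem_ofList]
    simp only [List.mem_cons, List.not_mem_nil, or_false] at hz ⊢
    rcases hz with rfl | rfl | rfl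
    · exact h.1
    · exact h.2.1
    · exact h.2.2
  · rw [decide_eq_false h]
    cases hb : PySem.Set.issubset (PySem.Set.ofList [c, d, e]) (PySem.Set.ofList [x, y])
    · rfl
    · exfalso
      rw [PySem.Set.issubset_iff] at hb
      apply h
      have hc := hb c (by rw [PySem.Set.mem_ofList]; simp)
      have hd := hb d (by rw [PySem.Set.mem_ofList]; simp)
      have he := hb e (by rw [PySem.Set.mem_ofList]; simp)
      rw [PySem.Set.mem_ofList] at hc hd he
      simp only [List.mem_cons, List.not_mem_nil, or_false] at hc hd he
      exact ⟨hc, hd, he⟩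

lemma mc_cons3 (c d e : Char) (t : List Char) :
    momentum_check (c :: d :: e :: t) false =
      if (c = 'R' ∨ c = 'D') ∧ (d = 'R' ∨ d = 'D') ∧ (e = 'R' ∨ e = 'D') then (false, 1)
      else if (c = 'A' ∨ c = 'S') ∧ (d = 'A' ∨ d = 'S') ∧ (e = 'A' ∨ e = 'S') then (true, 1)
      else (true, 0) := by
  have hlen : ((3:Int) ≤ ((c :: d :: e :: t).length : Int)) := by simp; omega
  have hsl : PySem.List.slice (c :: d :: e :: t) none (some 3) = [c, d, e] := by
    rw [show (3:Int) = ((3:Nat):Int) from rfl, PySem.List.slice_to_natCast]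
    rfl
  unfold momentum_check
  simp only [Bool.false_eq_true, if_false, if_pos hlen, hsl, issubset3]
  by_cases hR : (c = 'R' ∨ c = 'D') ∧ (d = 'R' ∨ d = 'D') ∧ (e = 'R' ∨ e = 'D') <;>
    by_cases hA : (c = 'A' ∨ c = 'S') ∧ (d = 'A' ∨ d = 'S') ∧ (e = 'A' ∨ e = 'S') <;>
      simp [hR, hA]
  exfalso
  rcases hR.1 with rfl | rfl <;> rcases hA.1 with h | h <;> simp_all


def bonusS (sr : Int) : List Char → Int
  | [] => 0
  | [c] => if (c = 'A' ∨ c = 'S') ∧ 2 ≤ sr then 1 else 0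
  | c :: d :: _ =>
      (if (c = 'A' ∨ c = 'S') ∧ 2 ≤ sr then 1 else 0) +
      (if (c = 'A' ∨ c = 'S') ∧ (d = 'A' ∨ d = 'S') ∧ 1 ≤ sr then 1 else 0)

def bonusR (rr : Int) : List Char → Int
  | [] => 0
  | [c] => if (c = 'R' ∨ c = 'D') ∧ 2 ≤ rr then 1 else 0
  | c :: d :: _ =>
      (if (c = 'R' ∨ c = 'D') ∧ 2 ≤ rr then 1 else 0) +
      (if (c = 'R' ∨ c = 'D') ∧ (d = 'R' ∨ d = 'D') ∧ 1 ≤ rr then 1 else 0)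

lemma bonusS_zero (cs : List Char) : bonusS 0 cs = 0 := by
  match cs with
  | [] => rfl
  | [c] => simp [bonusS]
  | c :: d :: t => simp [bonusS]

lemma bonusR_zero (cs : List Char) : bonusR 0 cs = 0 := by
  match cs with
  | [] => rfl
  | [c] => simp [bonusR]
  | c :: d :: t => simp [bonusR]

lemma aGo_cons (c : Char) (cs : List Char) (st : Int × Int × Int × Int × Int) :
    aGo (c :: cs) st = aGo cs (aStep (c :: cs) st) := rfl

lemma go_rel : ∀ (cs : List Char) (s r sm rm ac sr rr : Int), 0 ≤ sr → 0 ≤ rr →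
    (fun (t : Int × Int × Int × Int × Int × Int × Int) =>
      (t.1, t.2.1, t.2.2.1, t.2.2.2.1, t.2.2.2.2.1)) (cs.foldl bStep (s, r, sm, rm, ac, sr, rr)) =
    aGo cs (s, r, sm + bonusS sr cs, rm + bonusR rr cs, ac) := by
  intro cs
  induction cs with
  | nil => intro s r sm rm ac sr rr _ _; simp [aGo, bonusS, bonusR]
  | cons c cs ih =>
    intro s r sm rm ac sr rr hsr hrr
    rw [List.foldl_cons]
    by_cases hS : c = 'S'
    · subst hS
      rw [show bStep (s, r, sm, rm, ac, sr, rr) 'S' =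
          (s + 1, r, if 3 ≤ sr + 1 then sm + 1 else sm, rm, ac, sr + 1, 0) from by simp [bStep]]
      rw [ih (s + 1) r _ rm ac (sr + 1) 0 (by omega) le_rfl, aGo_cons]
      congr 1
      rcases cs with _ | ⟨d, _ | ⟨e, t⟩⟩
      · simp [aStep, mc_short1, bonusS, bonusR]
        split_ifs <;> omega
      · by_cases hdS : d = 'A' ∨ d = 'S' <;>
          simp [aStep, mc_short2, bonusS, bonusR, hdS] <;> split_ifs <;> omega
      · by_cases hdS : d = 'A' ∨ d = 'S' <;> by_cases heS : e = 'A' ∨ e = 'S' <;>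
          simp [aStep, mc_cons3, bonusS, bonusR, hdS, heS] <;> split_ifs <;> omega
    · by_cases hA : c = 'A'
      · subst hA
        rw [show bStep (s, r, sm, rm, ac, sr, rr) 'A' =
            (s + 1, r, if 3 ≤ sr + 1 then sm + 1 else sm, rm, ac + 1, sr + 1, 0) from by
          simp [bStep]]
        rw [ih (s + 1) r _ rm (ac + 1) (sr + 1) 0 (by omega) le_rfl, aGo_cons]
        congr 1
        rcases cs with _ | ⟨d, _ | ⟨e, t⟩⟩
        · simp [aStep, mc_short1, bonusS, bonusR]
          split_ifs <;> omega
        · by_cases hdS : d = 'A' ∨ d = 'S' <;>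
            simp [aStep, mc_short2, bonusS, bonusR, hdS] <;> split_ifs <;> omega
        · by_cases hdS : d = 'A' ∨ d = 'S' <;> by_cases heS : e = 'A' ∨ e = 'S' <;>
            simp [aStep, mc_cons3, bonusS, bonusR, hdS, heS] <;> split_ifs <;> omega
      · by_cases hR : c = 'R'
        · subst hR
          rw [show bStep (s, r, sm, rm, ac, sr, rr) 'R' =
              (s, r + 1, sm, if 3 ≤ rr + 1 then rm + 1 else rm, ac, 0, rr + 1) from by
            simp [bStep]]
          rw [ih s (r + 1) sm _ ac 0 (rr + 1) le_rfl (by omega), aGo_cons]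
          congr 1
          rcases cs with _ | ⟨d, _ | ⟨e, t⟩⟩
          · simp [aStep, mc_short1, bonusS, bonusR]
            split_ifs <;> omega
          · by_cases hdR : d = 'R' ∨ d = 'D' <;>
              simp [aStep, mc_short2, bonusS, bonusR, hdR] <;> split_ifs <;> omega
          · by_cases hdR : d = 'R' ∨ d = 'D' <;> by_cases heR : e = 'R' ∨ e = 'D' <;>
              simp [aStep, mc_cons3, bonusS, bonusR, hdR, heR] <;> split_ifs <;> omega
        · by_cases hD : c = 'D'
          · subst hD
            rw [show bStep (s, r, sm, rm, ac, sr, rr) 'D' =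
                (s, r + 1, sm, if 3 ≤ rr + 1 then rm + 1 else rm, ac, 0, rr + 1) from by
              simp [bStep]]
            rw [ih s (r + 1) sm _ ac 0 (rr + 1) le_rfl (by omega), aGo_cons]
            congr 1
            rcases cs with _ | ⟨d, _ | ⟨e, t⟩⟩
            · simp [aStep, mc_short1, bonusS, bonusR]
              split_ifs <;> omega
            · by_cases hdR : d = 'R' ∨ d = 'D' <;>
                simp [aStep, mc_short2, bonusS, bonusR, hdR] <;> split_ifs <;> omega
            · by_cases hdR : d = 'R' ∨ d = 'D' <;> by_cases heR : e = 'R' ∨ e = 'D' <;>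
                simp [aStep, mc_cons3, bonusS, bonusR, hdR, heR] <;> split_ifs <;> omega
          · rw [show bStep (s, r, sm, rm, ac, sr, rr) c = (s, r, sm, rm, ac, 0, 0) from by
              simp [bStep, hS, hA, hR, hD]]
            rw [ih s r sm rm ac 0 0 le_rfl le_rfl, aGo_cons]
            congr 1
            rcases cs with _ | ⟨d, _ | ⟨e, t⟩⟩
            · simp [aStep, mc_short1, bonusS, bonusR, hS, hA, hR, hD]
            · simp [aStep, mc_short2, bonusS, bonusR, hS, hA, hR, hD]
            · simp [aStep, mc_cons3, bonusS, bonusR, hS, hA, hR, hD]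

-- ===== VERDICT (by name: the statement is the Claim_ definition above) =====
theorem extract_game_data_spec : Claim_equal_extract_game_data := by
  intro g _
  unfold Spec_extract_game_data extract_game_data extract_game_data_alt
  dsimp only
  have hA := foldA_eq_aGo g.toList g.toList.length 0 (0, 0, 0, 0, 0) (by omega)
  rw [Nat.cast_zero, List.drop_zero] at hA
  have hB := go_rel g.toList 0 0 0 0 0 0 0 le_rfl le_rfl
  rw [bonusS_zero, bonusR_zero] at hB
  norm_num at hB
  rw [hA]
  rcases hfb : g.toList.foldl bStep (0, 0, 0, 0, 0, 0, 0) with ⟨b1, b2, b3, b4, b5, b6, b7⟩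
  rw [hfb] at hB
  rcases hag : aGo g.toList (0, 0, 0, 0, 0) with ⟨a1, a2, a3, a4, a5⟩
  rw [hag] at hB
  simp only [Prod.mk.injEq] at hB
  obtain ⟨e1, e2, e3, e4, e5⟩ := hB
  simp [e1, e2, e3, e4, e5]
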